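-- pv_equiv track=rewrite | github.com/zura7cinco7/goa | Level 064/Homework/Homework.py | more_zeros
-- ===== SOURCE A (Python) =====
-- def more_zeros(s):
--     final = []
--     for i in s:
--         if i not in final:
--             binary_num = ord(i)
--             binary = ''
--             while binary_num > 0:
--                 binary = str(binary_num % 2) + binary
--                 binary_num //= 2
--             if binary.count('0')> binary.count('1'):
--                 final.append(i)
--     return final
-- ===== SOURCE B (Python) =====
-- def more_zeros(s):
--     final = []
--     seen = set()
--     for ch in s:
--         if ch not in seen:
--             seen.add(ch)
--             n = ord(ch)
--             ones = bin(n).count('1')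
--             if n.bit_length() > 2 * ones:
--                 final.append(ch)
--     return final
-- ===== Notes on version B (the rewrite author's own statement) =====
-- stated objective: faster
-- what changed: B replaces A's inner while-loop that builds a binary string digit by digit and then counts its zero and one digits with closed-form bit arithmetic (popcount via bin() and bit_length), and replaces A's membership scan of the growing result list with a separate seen-set for dedup.
import Mathlib
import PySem

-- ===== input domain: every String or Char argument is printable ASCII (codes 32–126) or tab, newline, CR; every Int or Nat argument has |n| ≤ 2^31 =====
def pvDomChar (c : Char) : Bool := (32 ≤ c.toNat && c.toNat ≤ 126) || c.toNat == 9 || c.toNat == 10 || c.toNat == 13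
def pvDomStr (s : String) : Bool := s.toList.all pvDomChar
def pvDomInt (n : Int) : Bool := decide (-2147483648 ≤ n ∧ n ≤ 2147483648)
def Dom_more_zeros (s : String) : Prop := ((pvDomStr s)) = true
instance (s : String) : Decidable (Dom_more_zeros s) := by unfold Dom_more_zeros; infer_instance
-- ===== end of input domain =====

-- B replaces A's digit-by-digit binary-string construction and counting with closed-form
-- bit arithmetic (popcount / bit-length) and dedups through a seen-set instead of scanning
-- the result list; same return value on every input (A is total).

-- ===== PORT A =====
-- the `while binary_num > 0` loop: prepends str(binary_num % 2) ('0' or '1') to the string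
def binDigits (n : Int) (acc : List Char) : List Char :=
  if h : 0 < n then
    binDigits (PySem.Int.floordiv n 2)
      ((if PySem.Int.mod n 2 == 1 then '1' else '0') :: acc)
  else acc
termination_by n.toNat
decreasing_by
  rw [PySem.Int.floordiv_eq_ediv_of_pos (by norm_num : (0:Int) < 2)]; omega

def aStep (finalA : List String) (i : Char) : List String :=
  if String.ofList [i] ∈ finalA then finalA
  else
    let binary := binDigits (i.toNat : Int) []
    if binary.count '0' > binary.count '1' then finalA ++ [String.ofList [i]] else finalA

def more_zeros (s : String) : List String :=
  s.toList.foldl aStep []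

-- ===== PORT B =====
-- bin(n).count('1')
def pyPopcount (n : Int) : Int :=
  if h : 0 < n then pyPopcount (PySem.Int.floordiv n 2) + PySem.Int.mod n 2 else 0
termination_by n.toNat
decreasing_by
  rw [PySem.Int.floordiv_eq_ediv_of_pos (by norm_num : (0:Int) < 2)]; omega

-- n.bit_length()
def pyBitLen (n : Int) : Int :=
  if h : 0 < n then pyBitLen (PySem.Int.floordiv n 2) + 1 else 0
termination_by n.toNat
decreasing_by
  rw [PySem.Int.floordiv_eq_ediv_of_pos (by norm_num : (0:Int) < 2)]; omega

def bStep (st : PySem.Set Char × List String) (ch : Char) : PySem.Set Char × List String :=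
  if PySem.Set.contains st.1 ch then st
  else
    let n : Int := ch.toNat
    let ones := pyPopcount n
    (PySem.Set.add st.1 ch,
     if pyBitLen n > 2 * ones then st.2 ++ [String.ofList [ch]] else st.2)

def more_zeros_alt (s : String) : List String :=
  (s.toList.foldl bStep (PySem.Set.empty, [])).2

-- ===== PRECONDITION & SPEC =====
def Spec_more_zeros (s : String) (out : List String) : Prop := out = more_zeros_alt s
instance (s : String) (out : List String) : Decidable (Spec_more_zeros s out) := by
  unfold Spec_more_zeros; infer_instance

-- ===== CLAIM (what is proved, stated in full; the proofs are below) =====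
def Claim_equal_more_zeros : Prop := ∀ (s : String), Dom_more_zeros s → Spec_more_zeros s (more_zeros s)

-- ===== LEMMAS AND PROOFS =====

lemma binDigits_counts (n : Int) (acc : List Char) :
    ((binDigits n acc).count '1' : Int) = pyPopcount n + (acc.count '1' : Int) ∧
    ((binDigits n acc).count '0' : Int) = (pyBitLen n - pyPopcount n) + (acc.count '0' : Int) := by
  induction n, acc using binDigits.induct with
  | case1 n acc h ih =>
    rw [binDigits, dif_pos h]
    rw [pyPopcount, dif_pos h, pyBitLen, dif_pos h]
    have hm := PySem.Int.mod_eq_emod_of_pos (a := n) (b := 2) (by norm_num)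
    obtain ⟨ih1, ih0⟩ := ih
    simp only [dite_eq_ite] at ih1 ih0
    rw [ih1, ih0]
    by_cases h2 : PySem.Int.mod n 2 = 1
    · simp [h2, List.count_cons]
      constructor <;> (split_ifs <;> omega)
    · have h0 : PySem.Int.mod n 2 = 0 := by omega
      simp [h0, List.count_cons]
      constructor <;> (split_ifs <;> omega)
  | case2 n acc h =>
    rw [binDigits, dif_neg h, pyPopcount, dif_neg h, pyBitLen, dif_neg h]
    constructor <;> ring

lemma cond_iff (n : Int) :
    (binDigits n []).count '0' > (binDigits n []).count '1' ↔
      pyBitLen n > 2 * pyPopcount n := by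
  obtain ⟨h1, h0⟩ := binDigits_counts n []
  simp only [List.count_nil] at h1 h0
  constructor
  · intro h
    have : ((binDigits n []).count '1' : Int) < ((binDigits n []).count '0' : Int) := by
      exact_mod_cast h
    omega
  · intro h
    have : ((binDigits n []).count '1' : Int) < ((binDigits n []).count '0' : Int) := by omega
    exact_mod_cast this

-- loop invariant: A's result list determines exactly which chars B has seen AND accepted
def LoopInv (seen : List Char) (finalA : List String) : Prop :=
  ∀ c : Char, String.ofList [c] ∈ finalA ↔
    (c ∈ seen ∧ pyBitLen (c.toNat : Int) > 2 * pyPopcount (c.toNat : Int))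

lemma loop_eq (cs : List Char) (seen : PySem.Set Char) (finalA : List String)
    (hInv : LoopInv seen finalA) :
    cs.foldl aStep finalA = (cs.foldl bStep (seen, finalA)).2 := by
  induction cs generalizing seen finalA with
  | nil => rfl
  | cons c cs ih =>
    simp only [List.foldl_cons]
    by_cases hc : c ∈ seen
    · have hcon : PySem.Set.contains seen c = true := by
        simpa [PySem.Set.contains] using hc
      rw [show bStep (seen, finalA) c = (seen, finalA) by simp [bStep, hcon, hc]]
      by_cases hf : String.ofList [c] ∈ finalA
      · rw [show aStep finalA c = finalA by simp [aStep, hf]]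
        exact ih seen finalA hInv
      · have hnc : ¬ pyBitLen (c.toNat : Int) > 2 * pyPopcount (c.toNat : Int) := by
          intro h; exact hf ((hInv c).mpr ⟨hc, h⟩)
        have : aStep finalA c = finalA := by
          simp only [aStep, if_neg hf]
          rw [if_neg]
          rw [cond_iff]; exact hnc
        rw [this]; exact ih seen finalA hInv
    · have hcon : PySem.Set.contains seen c = false := by
        simpa [PySem.Set.contains] using hc
      have hf : String.ofList [c] ∉ finalA := fun h => hc ((hInv c).mp h).1
      have hadd : PySem.Set.add seen c = seen ++ [c] := by
        simp [PySem.Set.add, hc]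
      by_cases hcnd : pyBitLen (c.toNat : Int) > 2 * pyPopcount (c.toNat : Int)
      · have ha : aStep finalA c = finalA ++ [String.ofList [c]] := by
          simp only [aStep, if_neg hf]
          rw [if_pos]
          rw [cond_iff]; exact hcnd
        have hb : bStep (seen, finalA) c = (seen ++ [c], finalA ++ [String.ofList [c]]) := by
          simp only [bStep, hcon, Bool.false_eq_true, if_false, if_pos hcnd, hadd]
        rw [ha, hb]
        refine ih _ _ ?_
        intro c'
        constructor
        · intro h
          rcases List.mem_append.mp h with h' | h'
          · obtain ⟨hs, hb'⟩ := (hInv c').mp h'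
            exact ⟨List.mem_append.mpr (Or.inl hs), hb'⟩
          · have : c' = c := by
              have h3 := congrArg String.toList (List.mem_singleton.mp h')
              rw [String.toList_ofList, String.toList_ofList] at h3
              simpa using h3
            subst this
            exact ⟨List.mem_append.mpr (Or.inr (List.mem_singleton.mpr rfl)), hcnd⟩
        · rintro ⟨hs, hb'⟩
          rcases List.mem_append.mp hs with h' | h'
          · exact List.mem_append.mpr (Or.inl ((hInv c').mpr ⟨h', hb'⟩))
          · have : c' = c := List.mem_singleton.mp h'
            subst this
            exact List.mem_append.mpr (Or.inr (List.mem_singleton.mpr rfl))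
      · have ha : aStep finalA c = finalA := by
          simp only [aStep, if_neg hf]
          rw [if_neg]
          rw [cond_iff]; exact hcnd
        have hb : bStep (seen, finalA) c = (seen ++ [c], finalA) := by
          simp only [bStep, hcon, Bool.false_eq_true, if_false, if_neg hcnd, hadd]
        rw [ha, hb]
        refine ih _ _ ?_
        intro c'
        rw [hInv c']
        constructor
        · rintro ⟨hs, hb'⟩; exact ⟨List.mem_append.mpr (Or.inl hs), hb'⟩
        · rintro ⟨hs, hb'⟩
          rcases List.mem_append.mp hs with h' | h'
          · exact ⟨h', hb'⟩
          · have : c' = c := List.mem_singleton.mp h'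
            subst this; exact absurd hb' hcnd
      
-- ===== VERDICT (by name: the statement is the Claim_ definition above) =====
theorem more_zeros_spec : Claim_equal_more_zeros := by
  intro s _
  unfold Spec_more_zeros more_zeros more_zeros_alt
  exact loop_eq s.toList PySem.Set.empty [] (fun c => by simp [PySem.Set.empty])
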